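-- pv_equiv track=rewrite | github.com/ericmerle3789/Collatz-Junction-Theorem | syracuse_jepa/engine/sequence_reasoner.py | inv_sorted_correction_nonzero
-- ===== SOURCE A (Python) =====
-- def inv_sorted_correction_nonzero(k, S, d, residues):
--     """Pour tout δ non-trié avec F(δ)=0 : F(sorted(δ)) ≠ 0.
--     C'est l'invariant d'ordonnancement."""
--     max_delta = S - k
--     inv3 = pow(3, -1, d)
--     rho = (2 * inv3) % d
--     rho_pow = [pow(rho, i, d) for i in range(k)]
--     two_pow = [pow(2, j, d) for j in range(max_delta + 1)]
--
--     total = (max_delta + 1) ** (k - 1)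
--     if total > 500000:
--         return None  # Can't verify
--
--     from itertools import product as cart_product
--     for deltas in cart_product(range(max_delta + 1), repeat=k-1):
--         f_val = (1 + sum(rho_pow[i+1] * two_pow[deltas[i]] % d for i in range(k-1))) % d
--         if f_val != 0: continue
--         sorted_d = tuple(sorted(deltas))
--         if sorted_d == deltas: continue
--         f_sorted = (1 + sum(rho_pow[i+1] * two_pow[sorted_d[i]] % d for i in range(k-1))) % d
--         if f_sorted == 0:
--             return False  # Sorting preserves zero — BAD
--     return True
-- ===== SOURCE B (Python) =====
-- def inv_sorted_correction_nonzero(k, S, d, residues):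
--     """Same invariant check as A, but by depth-first enumeration that carries the
--     partial modular sum along the tree, instead of re-summing k terms per tuple."""
--     max_delta = S - k
--     inv3 = pow(3, -1, d)
--     rho = (2 * inv3) % d
--     n = k - 1
--     m = max_delta + 1
--     if m ** n > 500000:
--         return None  # Can't verify
--     term = [[pow(rho, i + 1, d) * pow(2, x, d) % d for x in range(m)]
--             for i in range(n)]
--
--     def dfs(rem, partial, prefix):
--         if rem == 0:
--             if (1 + partial) % d != 0:
--                 return True
--             s = sorted(prefix)
--             if s == prefix:
--                 return True
--             return (1 + sum(term[j][s[j]] for j in range(n))) % d != 0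
--         i = len(prefix)
--         for x in range(m):
--             prefix.append(x)
--             ok = dfs(rem - 1, partial + term[i][x], prefix)
--             prefix.pop()
--             if not ok:
--                 return False
--         return True
--
--     return dfs(n, 0, [])
-- ===== Notes on version B (the rewrite author's own statement) =====
-- stated objective: faster
-- what changed: Replaces the itertools.product loop that re-computes the k-term modular sum for every tuple by a depth-first recursion over the same mixed-radix tree that carries the partial sum incrementally, against a precomputed term table, and tests the size guard before building the per-exponent tables.
import Mathlib
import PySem

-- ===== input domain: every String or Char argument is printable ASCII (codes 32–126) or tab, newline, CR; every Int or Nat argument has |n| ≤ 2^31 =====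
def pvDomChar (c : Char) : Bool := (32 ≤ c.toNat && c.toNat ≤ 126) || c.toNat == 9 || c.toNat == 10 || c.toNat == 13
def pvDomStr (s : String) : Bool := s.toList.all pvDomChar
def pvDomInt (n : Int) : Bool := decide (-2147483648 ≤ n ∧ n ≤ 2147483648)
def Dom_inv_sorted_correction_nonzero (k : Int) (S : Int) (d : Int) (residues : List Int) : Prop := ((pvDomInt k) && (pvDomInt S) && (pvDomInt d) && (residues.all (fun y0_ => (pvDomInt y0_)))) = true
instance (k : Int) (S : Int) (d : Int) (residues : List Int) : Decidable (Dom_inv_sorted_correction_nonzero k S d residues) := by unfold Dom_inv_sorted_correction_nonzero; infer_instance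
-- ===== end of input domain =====

-- B replaces A's per-tuple O(k) modular sum over itertools.product by a DFS over the
-- same mixed-radix tree that carries the partial sum incrementally (objective: faster
-- by a constant factor; same enumerated set of tuples).

-- Shared ports of the Python stdlib calls pow(b, e, d) (three-argument pow, e ≥ 0)
-- and pow(3, -1, d) (modular inverse); exact where gcd(3, d) = 1 for the inverse.
def pvPowMod (b : Int) (e : Nat) (d : Int) : Int :=
  if h : e = 0 then PySem.Int.mod 1 d
  else
    let r := pvPowMod (PySem.Int.mod (b * b) d) (e / 2) d
    if e % 2 = 0 then r else PySem.Int.mod (PySem.Int.mod b d * r) d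
termination_by e
decreasing_by exact Nat.div_lt_self (Nat.pos_of_ne_zero h) (by omega)

-- extended Euclid on naturals: pvEgcd a b = (x, y) with a*x + b*y = gcd a b
def pvEgcd : Nat → Nat → Int × Int
  | _, 0 => (1, 0)
  | a, b + 1 =>
    let p := pvEgcd (b + 1) (a % (b + 1))
    (p.2, p.1 - (a / (b + 1)) * p.2)
termination_by _ b => b
decreasing_by exact Nat.lt_of_lt_of_le (Nat.mod_lt _ (Nat.succ_pos b)) (Nat.le_refl _)

-- port of pow(3, -1, d); 0 where Python raises (excluded by Pre_)
def pvInvPow3 (d : Int) : Int :=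
  if Int.gcd 3 d = 1 then PySem.Int.mod (pvEgcd 3 d.natAbs).1 d else 0

-- ===== PORT A =====
-- f_val of A's inner generator: (1 + sum(rho_pow[i+1] * two_pow[ds[i]] % d for i in range(n))) % d
def pvFvalA (d : Int) (rp tp : List Int) (n : Nat) (ds : List Int) : Int :=
  PySem.Int.mod (1 + (List.range n).foldl (fun (acc : Int) (i : Nat) =>
    acc + PySem.Int.mod (PySem.List.pyGetD rp ((i : Int) + 1) 0 *
      PySem.List.pyGetD tp (PySem.List.pyGetD ds (i : Int) 0) 0) d) 0) d

-- itertools.product(range(m), repeat=r) in iteration order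
def pvTuples (m : Nat) : Nat → List (List Int)
  | 0 => [[]]
  | r + 1 => (List.range m).flatMap fun (x : Nat) => (pvTuples m r).map fun t => (x : Int) :: t

-- A's for-loop with its early return False
def pvLoopA (d : Int) (rp tp : List Int) (n : Nat) : List (List Int) → Option Bool
  | [] => some true
  | ds :: rest =>
    if pvFvalA d rp tp n ds ≠ 0 then pvLoopA d rp tp n rest
    else
      let s := PySem.List.sorted ds (fun x => x) false
      if s = ds then pvLoopA d rp tp n rest
      else if pvFvalA d rp tp n s = 0 then some false
      else pvLoopA d rp tp n rest

def inv_sorted_correction_nonzero (k : Int) (S : Int) (d : Int) (residues : List Int) : Option Bool :=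
  let max_delta := S - k
  let inv3 := pvInvPow3 d
  let rho := PySem.Int.mod (2 * inv3) d
  let rho_pow := (List.range k.toNat).map fun i => pvPowMod rho i d
  let two_pow := (List.range (max_delta + 1).toNat).map fun j => pvPowMod 2 j d
  let total := (max_delta + 1) ^ (k - 1).toNat
  if total > 500000 then none
  else pvLoopA d rho_pow two_pow (k - 1).toNat (pvTuples (max_delta + 1).toNat (k - 1).toNat)

-- ===== PORT B =====
-- sum(term[j][s[j]] for j in range(n)) of Source B's leaf
def pvSumTerm (term : List (List Int)) (n : Nat) (s : List Int) : Int :=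
  (List.range n).foldl (fun (acc : Int) (j : Nat) =>
    acc + PySem.List.pyGetD (PySem.List.pyGetD term (j : Int) []) (PySem.List.pyGetD s (j : Int) 0) 0) 0

-- Source B's dfs(rem, partial, pre)
def pvDfsB (term : List (List Int)) (d : Int) (n m : Nat) : Nat → Int → List Int → Bool
  | 0, part, pre =>
    if PySem.Int.mod (1 + part) d ≠ 0 then true
    else
      let s := PySem.List.sorted pre (fun x => x) false
      if s = pre then true
      else decide (PySem.Int.mod (1 + pvSumTerm term n s) d ≠ 0)
  | r + 1, part, pre =>
    (List.range m).all fun x =>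
      pvDfsB term d n m r
        (part + PySem.List.pyGetD (PySem.List.pyGetD term ((pre.length : Nat) : Int) []) ((x : Nat) : Int) 0)
        (pre ++ [(x : Int)])

def inv_sorted_correction_nonzero_alt (k : Int) (S : Int) (d : Int) (residues : List Int) : Option Bool :=
  let max_delta := S - k
  let inv3 := pvInvPow3 d
  let rho := PySem.Int.mod (2 * inv3) d
  let n := (k - 1).toNat
  let m := (max_delta + 1).toNat
  if (max_delta + 1) ^ n > 500000 then none
  else
    let term := (List.range n).map fun i =>
      (List.range m).map fun x => PySem.Int.mod (pvPowMod rho (i + 1) d * pvPowMod 2 x d) d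
    some (pvDfsB term d n m n 0 [])

-- ===== PRECONDITION & SPEC =====
-- Pre_ excludes exactly the inputs where Python A raises: k ≤ 0 (itertools.product
-- gets a negative repeat, or 0 ** -1) and d without an inverse of 3 (pow(3,-1,d)
-- raises ValueError, including d = 0).
def Pre_inv_sorted_correction_nonzero (k : Int) (S : Int) (d : Int) (residues : List Int) : Prop :=
  1 ≤ k ∧ Int.gcd 3 d = 1
instance (k : Int) (S : Int) (d : Int) (residues : List Int) : Decidable (Pre_inv_sorted_correction_nonzero k S d residues) := by unfold Pre_inv_sorted_correction_nonzero; infer_instance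
def pvWitness_inv_sorted_correction_nonzero : Int × Int × Int × List Int := (3, 5, 5, [])

def Spec_inv_sorted_correction_nonzero (k : Int) (S : Int) (d : Int) (residues : List Int) (out : Option Bool) : Prop := out = inv_sorted_correction_nonzero_alt k S d residues
instance (k : Int) (S : Int) (d : Int) (residues : List Int) (out : Option Bool) : Decidable (Spec_inv_sorted_correction_nonzero k S d residues out) := by unfold Spec_inv_sorted_correction_nonzero; infer_instance

-- ===== CLAIM (what is proved, stated in full; the proofs are below) =====
def Claim_equal_inv_sorted_correction_nonzero : Prop := ∀ (k : Int) (S : Int) (d : Int) (residues : List Int), Dom_inv_sorted_correction_nonzero k S d residues → Pre_inv_sorted_correction_nonzero k S d residues → Spec_inv_sorted_correction_nonzero k S d residues (inv_sorted_correction_nonzero k S d residues)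

-- ===== LEMMAS AND PROOFS =====


-- helper definitions used only by the proofs
def pvRp (rho d : Int) (n : Nat) : List Int :=
  (List.range (n + 1)).map fun i => pvPowMod rho i d

def pvTp (d : Int) (m : Nat) : List Int :=
  (List.range m).map fun j => pvPowMod 2 j d

def pvTerm (rho d : Int) (n m : Nat) : List (List Int) :=
  (List.range n).map fun i =>
    (List.range m).map fun x => PySem.Int.mod (pvPowMod rho (i + 1) d * pvPowMod 2 x d) d

def pvS (term : List (List Int)) : Nat → List Int → Int
  | _, [] => 0
  | i, x :: t => PySem.List.pyGetD (PySem.List.pyGetD term (i : Int) []) x 0 + pvS term (i + 1) t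

def pvOkA (d : Int) (rp tp : List Int) (n : Nat) (ds : List Int) : Bool :=
  if pvFvalA d rp tp n ds ≠ 0 then true
  else if PySem.List.sorted ds (fun x => x) false = ds then true
  else decide (pvFvalA d rp tp n (PySem.List.sorted ds (fun x => x) false) ≠ 0)

theorem pv_loopA_eq_all (d : Int) (rp tp : List Int) (n : Nat) (L : List (List Int)) :
    pvLoopA d rp tp n L = some (L.all (pvOkA d rp tp n)) := by
  induction L with
  | nil => rfl
  | cons ds rest ih =>
    by_cases h1 : pvFvalA d rp tp n ds ≠ 0
    · simp [pvLoopA, pvOkA, h1, ih]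
    · by_cases h2 : PySem.List.sorted ds (fun x => x) false = ds
      · simp [pvLoopA, pvOkA, h1, h2, ih]
      · by_cases h3 : pvFvalA d rp tp n (PySem.List.sorted ds (fun x => x) false) = 0
        · simp [pvLoopA, pvOkA, h1, h2, h3]
        · simp [pvLoopA, pvOkA, h1, h2, h3, ih]

theorem pv_foldl_add_gen (h : Nat → Int) (l : List Nat) (c : Int) :
    l.foldl (fun a x => a + h x) c = c + l.foldl (fun a x => a + h x) 0 := by
  induction l generalizing c with
  | nil => simp
  | cons y l ih => simp only [List.foldl_cons]; rw [ih, ih (0 + h y)]; ring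

theorem pv_tuples_shape (m : Nat) (r : Nat) (t : List Int) (ht : t ∈ pvTuples m r) :
    t.length = r ∧ ∀ x ∈ t, 0 ≤ x ∧ x < (m : Int) := by
  induction r generalizing t with
  | zero => simp [pvTuples] at ht; simp [ht]
  | succ r ih =>
    simp only [pvTuples] at ht
    rcases List.mem_flatMap.mp ht with ⟨x, hx, hmem2⟩
    rcases List.mem_map.mp hmem2 with ⟨t', ht', rfl⟩
    obtain ⟨hlen, hmem⟩ := ih t' ht'
    refine ⟨by simp [hlen], ?_⟩
    intro y hy
    rcases List.mem_cons.mp hy with rfl | hy'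
    · exact ⟨Int.natCast_nonneg x, by exact_mod_cast List.mem_range.mp hx⟩
    · exact hmem y hy'

theorem pv_all_tuples_succ (m r : Nat) (p : List Int → Bool) :
    (pvTuples m (r + 1)).all p
      = (List.range m).all fun x => (pvTuples m r).all fun t => p ((x : Int) :: t) := by
  simp [pvTuples, List.all_flatMap, List.all_map, Function.comp_def]

theorem pv_all_congr {α : Type} (l : List α) (f g : α → Bool)
    (h : ∀ x ∈ l, f x = g x) : l.all f = l.all g := by
  induction l with
  | nil => rfl
  | cons y l ih =>
    simp only [List.all_cons, h y (List.mem_cons_self), ih fun x hx => h x (List.mem_cons_of_mem y hx)]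

theorem pv_dfs_unroll (term : List (List Int)) (d : Int) (n m : Nat)
    (r : Nat) (part : Int) (pre : List Int) :
    pvDfsB term d n m r part pre
      = (pvTuples m r).all fun t => pvDfsB term d n m 0 (part + pvS term pre.length t) (pre ++ t) := by
  induction r generalizing part pre with
  | zero => simp [pvTuples, pvS]
  | succ r ih =>
    rw [pv_all_tuples_succ]
    conv_lhs => rw [pvDfsB]
    refine pv_all_congr _ _ _ ?_
    intro x hx
    rw [ih]
    refine pv_all_congr _ _ _ ?_
    intro t ht
    have h1 : (pre ++ [(x : Int)]).length = pre.length + 1 := by simp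
    have h2 : (pre ++ [(x : Int)]) ++ t = pre ++ ((x : Int) :: t) := by simp
    have h3 : part + PySem.List.pyGetD (PySem.List.pyGetD term ((pre.length : Nat) : Int) []) ((x : Nat) : Int) 0 + pvS term (pre.length + 1) t
        = part + pvS term pre.length ((x : Int) :: t) := by
      simp only [pvS]; ring
    rw [h1, h2, h3]

theorem pv_getD_map_range {α : Type} [Inhabited α] (f : Nat → α) (N i : Nat) (hd : α) (h : i < N) :
    PySem.List.pyGetD ((List.range N).map f) ((i : Nat) : Int) hd = f i := by
  rw [PySem.List.pyGetD_natCast]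
  simp [List.getD, h]

theorem pv_S_fold (term : List (List Int)) (t : List Int) (i : Nat) :
    pvS term i t
      = (List.range t.length).foldl (fun acc j =>
          acc + PySem.List.pyGetD (PySem.List.pyGetD term (((i + j : Nat)) : Int) [])
            (PySem.List.pyGetD t ((j : Nat) : Int) 0) 0) 0 := by
  induction t generalizing i with
  | nil => simp [pvS]
  | cons y t ihh =>
    simp only [pvS, List.length_cons, List.range_succ_eq_map]
    rw [List.foldl_cons, List.foldl_map, pv_foldl_add_gen]
    have hstep : ∀ (a : Int), ∀ j ∈ List.range t.length,
        a + PySem.List.pyGetD (PySem.List.pyGetD term (((i + Nat.succ j : Nat)) : Int) [])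
            (PySem.List.pyGetD (y :: t) (((Nat.succ j : Nat)) : Int) 0) 0
        = a + PySem.List.pyGetD (PySem.List.pyGetD term ((((i + 1) + j : Nat)) : Int) [])
            (PySem.List.pyGetD t ((j : Nat) : Int) 0) 0 := by
      intro a j _
      have e1 : i + Nat.succ j = (i + 1) + j := by omega
      have e2 : PySem.List.pyGetD (y :: t) (((Nat.succ j : Nat)) : Int) 0
          = PySem.List.pyGetD t ((j : Nat) : Int) 0 := by
        rw [PySem.List.pyGetD_natCast, PySem.List.pyGetD_natCast]
        simp [List.getD]
      rw [e1, e2]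
    rw [PySem.List.foldl_congr_mem _ _ _ _ hstep, ← ihh (i + 1)]
    have hy : PySem.List.pyGetD (y :: t) (((0 : Nat)) : Int) 0 = y := by
      rw [PySem.List.pyGetD_natCast]; rfl
    rw [hy]
    simp

theorem pv_S_eq_sumTerm (term : List (List Int)) (n : Nat) (t : List Int) (hlen : t.length = n) :
    pvS term 0 t = pvSumTerm term n t := by
  rw [pv_S_fold, hlen]
  unfold pvSumTerm
  refine PySem.List.foldl_congr_mem _ _ _ _ ?_
  intro a j _
  simp

theorem pv_fval_bridge (d rho : Int) (n m : Nat) (ds : List Int)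
    (hlen : ds.length = n) (hb : ∀ x ∈ ds, 0 ≤ x ∧ x < (m : Int)) :
    pvFvalA d (pvRp rho d n) (pvTp d m) n ds
      = PySem.Int.mod (1 + pvSumTerm (pvTerm rho d n m) n ds) d := by
  unfold pvFvalA pvSumTerm
  congr 1
  congr 1
  refine PySem.List.foldl_congr_mem _ _ _ _ ?_
  intro acc i hi
  have hi' : i < n := List.mem_range.mp hi
  have hiL : i < ds.length := by omega
  have hds : PySem.List.pyGetD ds ((i : Nat) : Int) 0 = ds[i] := by
    rw [PySem.List.pyGetD_natCast]
    exact List.getD_eq_getElem ds 0 hiL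
  obtain ⟨hx0, hxm⟩ := hb ds[i] (List.getElem_mem hiL)
  have hxcast : ds[i] = ((ds[i].toNat : Nat) : Int) := (Int.toNat_of_nonneg hx0).symm
  have hxm' : ds[i].toNat < m := by omega
  have hrp : PySem.List.pyGetD (pvRp rho d n) ((i : Int) + 1) 0 = pvPowMod rho (i + 1) d := by
    have : ((i : Int) + 1) = (((i + 1 : Nat)) : Int) := by push_cast; ring
    rw [this]
    exact pv_getD_map_range _ (n + 1) (i + 1) 0 (by omega)
  have htp : PySem.List.pyGetD (pvTp d m) ds[i] 0 = pvPowMod 2 ds[i].toNat d := by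
    rw [hxcast]
    exact pv_getD_map_range _ m ds[i].toNat 0 hxm'
  have hterm : PySem.List.pyGetD (PySem.List.pyGetD (pvTerm rho d n m) ((i : Nat) : Int) []) ds[i] 0
      = PySem.Int.mod (pvPowMod rho (i + 1) d * pvPowMod 2 ds[i].toNat d) d := by
    unfold pvTerm
    rw [pv_getD_map_range _ n i [] hi', hxcast]
    exact pv_getD_map_range _ m ds[i].toNat 0 hxm'
  rw [hds, hrp, htp, hterm]

theorem pv_leaf_eq (d rho : Int) (n m : Nat) (t : List Int)
    (hlen : t.length = n) (hb : ∀ x ∈ t, 0 ≤ x ∧ x < (m : Int)) :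
    pvDfsB (pvTerm rho d n m) d n m 0 (pvS (pvTerm rho d n m) 0 t) t
      = pvOkA d (pvRp rho d n) (pvTp d m) n t := by
  have hs_len : (PySem.List.sorted t (fun x => x) false).length = n := by
    rw [PySem.List.length_sorted]; exact hlen
  have hs_mem : ∀ x ∈ PySem.List.sorted t (fun x => x) false, 0 ≤ x ∧ x < (m : Int) := by
    intro x hx
    exact hb x ((PySem.List.mem_sorted _ _ _ _).mp hx)
  have hfa := pv_fval_bridge d rho n m t hlen hb
  have hsa := pv_fval_bridge d rho n m (PySem.List.sorted t (fun x => x) false) hs_len hs_mem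
  simp only [pvDfsB, pvOkA, hfa, hsa, pv_S_eq_sumTerm _ n t hlen]

-- ===== VERDICT (by name: the statement is the Claim_ definition above) =====
theorem inv_sorted_correction_nonzero_spec : Claim_equal_inv_sorted_correction_nonzero := by
  intro k S d residues _hdom hpre
  obtain ⟨hk, -⟩ := hpre
  unfold Spec_inv_sorted_correction_nonzero inv_sorted_correction_nonzero inv_sorted_correction_nonzero_alt
  simp only
  split_ifs with hguard
  · rfl
  · have hk' : k.toNat = (k - 1).toNat + 1 := by omega
    have hrp : (List.range k.toNat).map (fun i => pvPowMod (PySem.Int.mod (2 * pvInvPow3 d) d) i d)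
        = pvRp (PySem.Int.mod (2 * pvInvPow3 d) d) d (k - 1).toNat := by
      rw [pvRp, hk']
    rw [hrp]
    rw [pv_loopA_eq_all, pv_dfs_unroll]
    refine congrArg some ?_
    refine (pv_all_congr _ _ _ ?_).symm
    intro t ht
    obtain ⟨hlen, hb⟩ := pv_tuples_shape (S - k + 1).toNat (k - 1).toNat t ht
    have hleaf := pv_leaf_eq d (PySem.Int.mod (2 * pvInvPow3 d) d) (k - 1).toNat (S - k + 1).toNat t hlen hb
    simpa [pvTerm, pvTp, pvRp] using hleaf
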